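-- pv_equiv track=rewrite | github.com/bcwarner/physicl | test/test_units.py | dict_equiv
-- ===== SOURCE A (Python) =====
-- def dict_equiv(a, b):
-- 	for k, v in a.items():
-- 		if k in b and b[k] != 0 and v != b[k]:
-- 			return False
-- 	for k, v in b.items():
-- 		if k in a and a[k] != 0 and v != a[k]:
-- 			return False
-- 	return True
-- ===== SOURCE B (Python) =====
-- def dict_equiv(a, b):
--     common = a.keys() & b.keys()
--     return all(a[k] == b[k] or (a[k] == 0 and b[k] == 0) for k in common)
-- ===== Notes on version B (the rewrite author's own statement) =====
-- stated objective: simpler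
-- what changed: B replaces A's two full passes (one over each dict, each with its own three-way guard) by a single all() over the key intersection with one combined predicate a[k]==b[k] or a[k]==0==b[k].
import Mathlib
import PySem

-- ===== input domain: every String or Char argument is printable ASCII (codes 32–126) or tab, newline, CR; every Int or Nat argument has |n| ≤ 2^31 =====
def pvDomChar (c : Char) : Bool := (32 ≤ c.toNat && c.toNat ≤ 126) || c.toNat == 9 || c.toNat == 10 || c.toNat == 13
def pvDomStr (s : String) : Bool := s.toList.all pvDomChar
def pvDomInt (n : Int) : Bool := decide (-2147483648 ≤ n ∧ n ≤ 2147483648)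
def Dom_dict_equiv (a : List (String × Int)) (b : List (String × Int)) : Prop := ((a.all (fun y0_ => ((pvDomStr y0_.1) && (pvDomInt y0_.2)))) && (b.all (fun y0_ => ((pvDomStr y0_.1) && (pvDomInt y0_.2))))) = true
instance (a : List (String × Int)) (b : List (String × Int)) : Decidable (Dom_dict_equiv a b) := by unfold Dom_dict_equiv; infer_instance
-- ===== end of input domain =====

-- B merges A's two passes into one all() over the key intersection: same value, simpler shape.

-- ===== PORT A =====
-- one of A's `for k, v in d.items(): if k in other and other[k] != 0 and v != other[k]: return False` loops
def pvPassA (d : PySem.Dict String Int) : List (String × Int) → Bool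
  | [] => true
  | (k, v) :: rest =>
    match d.get? k with                      -- `k in other` and `other[k]` together
    | some w => if w ≠ 0 && v ≠ w then false else pvPassA d rest
    | none => pvPassA d rest

def dict_equiv (a : List (String × Int)) (b : List (String × Int)) : Bool :=
  let da := PySem.Dict.ofList a
  let db := PySem.Dict.ofList b
  if pvPassA db da.items = false then false   -- first loop may `return False`
  else pvPassA da db.items                    -- second loop, then `return True`

-- ===== PORT B =====
def dict_equiv_alt (a : List (String × Int)) (b : List (String × Int)) : Bool :=
  let da := PySem.Dict.ofList a
  let db := PySem.Dict.ofList b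
  -- common = a.keys() & b.keys()  (all() below is order-insensitive, so list order is exact)
  let common := da.keys.filter (fun k => db.contains k)
  -- a[k] / b[k]: k is in both dicts, so getD _ 0 equals the Python subscript exactly
  common.all (fun k =>
    (da.getD k 0 == db.getD k 0) || ((da.getD k 0 == 0) && (db.getD k 0 == 0)))

-- ===== PRECONDITION & SPEC =====
def Spec_dict_equiv (a : List (String × Int)) (b : List (String × Int)) (out : Bool) : Prop := out = dict_equiv_alt a b
instance (a : List (String × Int)) (b : List (String × Int)) (out : Bool) : Decidable (Spec_dict_equiv a b out) := by unfold Spec_dict_equiv; infer_instance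

-- ===== CLAIM (what is proved, stated in full; the proofs are below) =====
def Claim_equal_dict_equiv : Prop := ∀ (a : List (String × Int)) (b : List (String × Int)), Dom_dict_equiv a b → Spec_dict_equiv a b (dict_equiv a b)

-- ===== LEMMAS AND PROOFS =====

theorem pvPassA_eq_true (d : PySem.Dict String Int) (l : List (String × Int)) :
    pvPassA d l = true ↔ ∀ p ∈ l, ∀ w, d.get? p.1 = some w → w = 0 ∨ p.2 = w := by
  induction l with
  | nil => simp [pvPassA]
  | cons p rest ih =>
    obtain ⟨k, v⟩ := p
    simp only [pvPassA]
    cases h : d.get? k with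
    | none =>
      simp only [List.mem_cons, ih]
      constructor
      · rintro hr q (rfl | hq) w hw
        · simp [h] at hw
        · exact hr q hq w hw
      · intro hall q hq w hw; exact hall q (Or.inr hq) w hw
    | some w =>
      by_cases hviol : w ≠ 0 && v ≠ w
      · simp only [hviol, if_true]
        simp only [decide_eq_true_eq, Bool.and_eq_true, ne_eq, decide_not, Bool.not_eq_true',
          decide_eq_false_iff_not] at hviol
        constructor
        · intro hf; exact absurd hf (by simp)
        · intro hall
          have := hall (k, v) (List.mem_cons_self) w h
          rcases this with h0 | hvw
          · exact absurd h0 hviol.1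
          · exact absurd hvw hviol.2
      · simp only [if_neg hviol, ih]
        simp only [Bool.and_eq_true, decide_eq_true_eq, ne_eq, not_and_or, not_not] at hviol
        constructor
        · intro hr q hq w' hw'
          rcases List.mem_cons.1 hq with rfl | hq'
          · simp only at hw'
            rw [h] at hw'; injection hw' with hww; subst hww
            exact hviol
          · exact hr q hq' w' hw'
        · intro hall q hq w' hw'; exact hall q (List.mem_cons_of_mem _ hq) w' hw'

theorem dict_equiv_spec : Claim_equal_dict_equiv := by
  intro a b _
  unfold Spec_dict_equiv dict_equiv dict_equiv_alt
  set da := PySem.Dict.ofList a with hda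
  set db := PySem.Dict.ofList b with hdb
  have hna : da.keys.Nodup := PySem.Dict.nodup_keys_ofList a
  have hnb : db.keys.Nodup := PySem.Dict.nodup_keys_ofList b
  -- reduce both sides to Prop
  rw [Bool.eq_iff_iff]
  simp only [List.all_eq_true, List.mem_filter, Bool.or_eq_true, Bool.and_eq_true, beq_iff_eq]
  constructor
  · intro hA k hk
    obtain ⟨hka, hkb⟩ := hk
    have h1 : pvPassA db da.items = true := by
      by_contra h; simp only [Bool.not_eq_true] at h; rw [h] at hA; simp at hA
    have h2 : pvPassA da db.items = true := by
      rw [h1] at hA; simpa using hA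
    rw [pvPassA_eq_true] at h1 h2
    -- k is in both dicts
    have hkb' : k ∈ db.keys := (PySem.Dict.contains_iff_mem_keys db k).1 hkb
    have hgb : db.get? k = some (db.getD k 0) := by
      rcases (PySem.Dict.items_eq_map_keys db hnb 0 ▸ List.mem_map.2 ⟨k, hkb', rfl⟩ :
        (k, db.getD k 0) ∈ db.items) with hm
      exact PySem.Dict.get?_of_mem_items db hm hnb
    have hga : da.get? k = some (da.getD k 0) := by
      rcases (PySem.Dict.items_eq_map_keys da hna 0 ▸ List.mem_map.2 ⟨k, hka, rfl⟩ :
        (k, da.getD k 0) ∈ da.items) with hm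
      exact PySem.Dict.get?_of_mem_items da hm hna
    have hmi : (k, da.getD k 0) ∈ da.items := PySem.Dict.mem_items_of_get?_eq_some da hga
    have hmib : (k, db.getD k 0) ∈ db.items := PySem.Dict.mem_items_of_get?_eq_some db hgb
    have c1 := h1 (k, da.getD k 0) hmi (db.getD k 0) hgb
    have c2 := h2 (k, db.getD k 0) hmib (da.getD k 0) hga
    simp only at c1 c2
    rcases c1 with h0 | hvw
    · rcases c2 with h0' | hvw'
      · exact Or.inr ⟨h0', h0⟩
      · exact Or.inl hvw'.symm
    · exact Or.inl hvw
  · intro hB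
    have key : ∀ (k : String) (v w : Int), da.get? k = some v → db.get? k = some w →
        v = w ∨ (v = 0 ∧ w = 0) := by
      intro k v w hv hw
      have hka : k ∈ da.keys := by
        have := PySem.Dict.mem_items_of_get?_eq_some da hv
        exact PySem.Dict.mem_keys_of_mem_items da this
      have hkb : db.contains k = true := by
        rw [PySem.Dict.contains_iff_mem_keys]
        exact PySem.Dict.mem_keys_of_mem_items db (PySem.Dict.mem_items_of_get?_eq_some db hw)
      have := hB k ⟨hka, hkb⟩
      have hva : da.getD k 0 = v := PySem.Dict.getD_of_get?_eq_some da 0 hv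
      have hwb : db.getD k 0 = w := PySem.Dict.getD_of_get?_eq_some db 0 hw
      rw [hva, hwb] at this
      exact this
    have h1 : pvPassA db da.items = true := by
      rw [pvPassA_eq_true]
      rintro ⟨k, v⟩ hp w hw
      have hv : da.get? k = some v := PySem.Dict.get?_of_mem_items da hp hna
      rcases key k v w hv hw with heq | ⟨_, h0⟩
      · exact Or.inr heq
      · exact Or.inl h0
    have h2 : pvPassA da db.items = true := by
      rw [pvPassA_eq_true]
      rintro ⟨k, w⟩ hp v hv
      have hw : db.get? k = some w := PySem.Dict.get?_of_mem_items db hp hnb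
      rcases key k v w hv hw with heq | ⟨h0, _⟩
      · exact Or.inr heq.symm
      · exact Or.inl h0
    simp [h1, h2]
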